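-- pv_equiv track=rewrite | github.com/seanwangsalad/mpnn-caliby | inverse_fold.py | parse_restricted_aas
-- ===== SOURCE A (Python) =====
-- AA_ALPHABET = set("ACDEFGHIKLMNPQRSTVWY")
--
-- def parse_restricted_aas(raw_value: str) -> str:
--     value = (raw_value or "").strip()
--     if not value:
--         return ""
--
--     parsed = [char.upper() for char in value if not char.isspace() and char != ","]
--
--     invalid = sorted({aa for aa in parsed if aa not in AA_ALPHABET})
--     if invalid:
--         raise ValueError(f"Unsupported amino acids in --restricted-aas: {invalid}")
--     return "".join(dict.fromkeys(parsed))
-- ===== SOURCE B (Python) =====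
-- AA_ALPHABET = set("ACDEFGHIKLMNPQRSTVWY")
--
-- def parse_restricted_aas(raw_value: str) -> str:
--     # Different algorithm: validate via set difference, and instead of an ordered
--     # dedup of the input, select the alphabet letters present and sort them by
--     # their first occurrence (list.index) in the cleaned sequence.
--     s = [c.upper() for c in (raw_value or "") if not c.isspace() and c != ","]
--     bad = sorted(set(s) - AA_ALPHABET)
--     if bad:
--         raise ValueError(f"Unsupported amino acids in --restricted-aas: {bad}")
--     return "".join(sorted((aa for aa in AA_ALPHABET if aa in s), key=s.index))
-- ===== Notes on version B (the rewrite author's own statement) =====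
-- stated objective: alternative
-- what changed: Validation becomes a set difference against the alphabet, and the ordered dedup (dict.fromkeys) is replaced by a different algorithm: select the alphabet letters that occur in the cleaned sequence and sort them by their first-occurrence index (list.index), which yields the same first-occurrence order.
import Mathlib
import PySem

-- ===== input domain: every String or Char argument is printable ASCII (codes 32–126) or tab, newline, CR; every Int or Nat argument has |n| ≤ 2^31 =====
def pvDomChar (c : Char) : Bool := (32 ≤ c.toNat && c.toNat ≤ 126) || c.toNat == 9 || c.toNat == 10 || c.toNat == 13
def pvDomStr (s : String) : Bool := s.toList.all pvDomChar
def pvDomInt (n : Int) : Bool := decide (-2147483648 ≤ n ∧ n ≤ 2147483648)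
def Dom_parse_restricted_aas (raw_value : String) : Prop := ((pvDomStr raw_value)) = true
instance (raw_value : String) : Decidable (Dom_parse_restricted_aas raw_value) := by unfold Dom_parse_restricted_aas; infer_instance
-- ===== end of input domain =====

-- B validates via a set difference against the alphabet and replaces A's ordered dedup
-- (dict.fromkeys) by sorting the alphabet letters present in the input by first-occurrence
-- index; objective: an alternative algorithm of similar cost.

-- module constant AA_ALPHABET = set("ACDEFGHIKLMNPQRSTVWY")
def aaAlphabet : PySem.Set Char := PySem.Set.ofList "ACDEFGHIKLMNPQRSTVWY".toList

-- ===== PORT A =====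
def parse_restricted_aas (raw_value : String) : String :=
  let value := PySem.Str.strip raw_value
  if value = "" then "" else
  let parsed : List Char :=
    (value.toList.filter (fun c => !(PySem.Chars.isspace c) && !(c == ','))).map
      PySem.Chars.upperChar
  let invalid : List Char :=
    PySem.List.sorted (PySem.Set.ofList (parsed.filter (fun a => !(aaAlphabet.contains a))))
      (fun x => x) false
  if invalid ≠ [] then ""  -- raise ValueError (these inputs are excluded by Pre_)
  else String.mk (PySem.List.dedup parsed)

-- ===== PORT B =====
def parse_restricted_aas_alt (raw_value : String) : String :=
  let s : List Char :=
    (raw_value.toList.filter (fun c => !(PySem.Chars.isspace c) && !(c == ','))).map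
      PySem.Chars.upperChar
  let bad : List Char :=
    PySem.List.sorted (PySem.Set.diff (PySem.Set.ofList s) aaAlphabet) (fun x => x) false
  if bad ≠ [] then ""  -- raise ValueError (these inputs are excluded by Pre_)
  else String.mk
    (PySem.List.sorted (aaAlphabet.filter (fun aa => s.contains aa))
      (fun aa => (PySem.List.index? s aa).getD 0) false)

-- ===== PRECONDITION & SPEC =====
-- Pre_ excludes exactly the inputs containing a non-separator character whose uppercase form
-- is not in AA_ALPHABET: there the Python A raises ValueError.
def Pre_parse_restricted_aas (raw_value : String) : Prop :=
  ((PySem.Str.strip raw_value).toList.all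
    (fun c => (PySem.Chars.isspace c || c == ',') ||
      aaAlphabet.contains (PySem.Chars.upperChar c))) = true
instance (raw_value : String) : Decidable (Pre_parse_restricted_aas raw_value) := by
  unfold Pre_parse_restricted_aas; infer_instance

def pvWitness_parse_restricted_aas : String := "AC"

def Spec_parse_restricted_aas (raw_value : String) (out : String) : Prop :=
  out = parse_restricted_aas_alt raw_value
instance (raw_value : String) (out : String) : Decidable (Spec_parse_restricted_aas raw_value out) := by
  unfold Spec_parse_restricted_aas; infer_instance

-- ===== CLAIM (what is proved, stated in full; the proofs are below) =====
def Claim_equal_parse_restricted_aas : Prop :=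
  ∀ (raw_value : String), Dom_parse_restricted_aas raw_value →
    Pre_parse_restricted_aas raw_value →
    Spec_parse_restricted_aas raw_value (parse_restricted_aas raw_value)

-- ===== LEMMAS AND PROOFS =====

-- stripping only removes whitespace, which the filter drops anyway
lemma pvFilter_dropWhile_isspace (pred : Char → Bool)
    (hp : ∀ c, PySem.Chars.isspace c = true → pred c = false) (l : List Char) :
    (l.dropWhile PySem.Chars.isspace).filter pred = l.filter pred := by
  induction l with
  | nil => rfl
  | cons c l ih =>
    by_cases hc : PySem.Chars.isspace c = true
    · simp [hc, ih, hp c hc]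
    · simp [hc]

lemma pvFilter_strip (pred : Char → Bool)
    (hp : ∀ c, PySem.Chars.isspace c = true → pred c = false) (l : List Char) :
    (PySem.Chars.strip l).filter pred = l.filter pred := by
  unfold PySem.Chars.strip PySem.Chars.rstrip PySem.Chars.lstrip
  rw [List.filter_reverse, pvFilter_dropWhile_isspace pred hp, List.filter_reverse,
    List.reverse_reverse, pvFilter_dropWhile_isspace pred hp]

-- the fold that builds Python's insertion-ordered set, for any accumulator
lemma pvFoldl_add (t : List Char) : ∀ (s : List Char),
    t.foldl PySem.Set.add s = s ++ (PySem.List.dedup t).filter (fun x => !s.contains x) := by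
  induction t with
  | nil => intro s; simp
  | cons c t ih =>
    intro s
    have hd : PySem.List.dedup (c :: t)
        = c :: (PySem.List.dedup t).filter (fun x => !((x == c) || false)) := by
      show List.foldl PySem.Set.add (PySem.Set.add [] c) t = _
      have h0 : PySem.Set.add ([] : List Char) c = [c] := rfl
      rw [h0, ih [c]]
      simp only [List.cons_append, List.nil_append, List.contains_cons, List.contains_nil]
    rw [hd]
    show List.foldl PySem.Set.add (PySem.Set.add s c) t = _
    by_cases hc : s.contains c = true
    · have hA : PySem.Set.add s c = s := by unfold PySem.Set.add; exact if_pos hc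
      rw [hA, ih s, List.filter_cons]
      rw [if_neg (by rw [hc]; simp), List.filter_filter]
      congr 1
      apply List.filter_congr
      intro x _
      by_cases hx : (x == c) = true
      · have hxc : x = c := by simpa using hx
        subst hxc
        rw [hc]; rfl
      · have hx' : (x == c) = false := by simpa using hx
        rw [hx']; simp
    · have hcf : s.contains c = false := by simpa using hc
      have hA : PySem.Set.add s c = s ++ [c] := by
        unfold PySem.Set.add; exact if_neg hc
      rw [hA, ih (s ++ [c]), List.filter_cons]
      rw [if_pos (by rw [hcf]; rfl), List.filter_filter, List.append_assoc,
        List.singleton_append]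
      congr 1
      congr 1
      apply List.filter_congr
      intro x _
      simp only [List.contains_append, List.contains_cons, List.contains_nil, Bool.not_or]

lemma pvDedup_cons (c : Char) (t : List Char) :
    PySem.List.dedup (c :: t) = c :: (PySem.List.dedup t).filter (fun x => !((x == c) || false)) := by
  show List.foldl PySem.Set.add (PySem.Set.add [] c) t = _
  have h0 : PySem.Set.add ([] : List Char) c = [c] := rfl
  rw [h0, pvFoldl_add t [c]]
  simp only [List.cons_append, List.nil_append, List.contains_cons, List.contains_nil]

-- dedup lists first occurrences in order of first occurrence: the idxOf? keys increase
lemma pvDedup_pairwise (t : List Char) :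
    (PySem.List.dedup t).Pairwise
      (fun a b => (List.idxOf? a t).getD 0 < (List.idxOf? b t).getD 0) := by
  induction t with
  | nil => simp [PySem.List.dedup, PySem.Set.ofList]
  | cons c t ih =>
    rw [pvDedup_cons]
    constructor
    · intro b hb
      obtain ⟨hbm, hbne⟩ := List.mem_filter.mp hb
      have hbne' : b ≠ c := by simpa using hbne
      have hbt : b ∈ t := (PySem.List.mem_dedup t b).mp hbm
      obtain ⟨k, hk⟩ := Option.isSome_iff_exists.mp (List.isSome_idxOf?.mpr hbt)
      rw [List.idxOf?_cons, if_pos (by simp), List.idxOf?_cons,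
        if_neg (by simp [Ne.symm hbne']), hk]
      simp
    · refine List.Pairwise.imp_of_mem ?_ (List.Pairwise.filter _ ih)
      intro a b ha hb hab
      obtain ⟨ham, hane⟩ := List.mem_filter.mp ha
      obtain ⟨hbm, hbne⟩ := List.mem_filter.mp hb
      have hane' : a ≠ c := by simpa using hane
      have hbne' : b ≠ c := by simpa using hbne
      have hat : a ∈ t := (PySem.List.mem_dedup t a).mp ham
      have hbt : b ∈ t := (PySem.List.mem_dedup t b).mp hbm
      obtain ⟨ka, hka⟩ := Option.isSome_iff_exists.mp (List.isSome_idxOf?.mpr hat)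
      obtain ⟨kb, hkb⟩ := Option.isSome_iff_exists.mp (List.isSome_idxOf?.mpr hbt)
      rw [List.idxOf?_cons, if_neg (by simp [Ne.symm hane']), hka,
        List.idxOf?_cons, if_neg (by simp [Ne.symm hbne']), hkb]
      rw [hka, hkb] at hab
      simpa using Nat.add_lt_add_right (by simpa using hab) 1

-- the core: sorting the alphabet letters present in t by first-occurrence index IS dedup t
lemma pvSorted_eq_dedup (t : List Char) (ht : ∀ c ∈ t, c ∈ aaAlphabet) :
    PySem.List.sorted (aaAlphabet.filter (fun aa => t.contains aa))
      (fun aa => (PySem.List.index? t aa).getD 0) false = PySem.List.dedup t := by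
  apply PySem.List.sorted_eq_of_perm_of_pairwise_lt
  · rw [List.perm_ext_iff_of_nodup (PySem.List.nodup_dedup t)
      (List.Nodup.filter _ (by decide : (aaAlphabet : List Char).Nodup))]
    intro a
    rw [PySem.List.mem_dedup, List.mem_filter]
    constructor
    · intro hat
      exact ⟨ht a hat, List.contains_iff_mem.mpr hat⟩
    · intro ⟨_, hc⟩
      exact List.contains_iff_mem.mp hc
  · exact pvDedup_pairwise t

-- ===== VERDICT (by name: the statement is the Claim_ definition above) =====
theorem parse_restricted_aas_spec : Claim_equal_parse_restricted_aas := by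
  intro raw_value _ hpre0
  unfold Spec_parse_restricted_aas
  show parse_restricted_aas raw_value = _
  have hps : ∀ c, PySem.Chars.isspace c = true →
      (fun c => !(PySem.Chars.isspace c) && !(c == ',')) c = false := by
    intro c hc; simp [hc]
  have hs_eq : raw_value.toList.filter (fun c => !(PySem.Chars.isspace c) && !(c == ','))
      = (PySem.Str.strip raw_value).toList.filter
          (fun c => !(PySem.Chars.isspace c) && !(c == ',')) := by
    rw [PySem.Str.toList_strip, pvFilter_strip _ hps]
  have ht : ∀ c ∈ ((PySem.Str.strip raw_value).toList.filter
      (fun c => !(PySem.Chars.isspace c) && !(c == ','))).map PySem.Chars.upperChar,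
      c ∈ aaAlphabet := by
    intro c hc
    obtain ⟨d, hd, rfl⟩ := List.mem_map.mp hc
    obtain ⟨hdm, hdp⟩ := List.mem_filter.mp hd
    have hall := List.all_eq_true.mp hpre0 d hdm
    apply List.contains_iff_mem.mp
    revert hall hdp
    by_cases h1 : PySem.Chars.isspace d = true <;> by_cases h2 : (d == ',') = true <;>
      simp [h1, h2]
  set t : List Char := ((PySem.Str.strip raw_value).toList.filter
      (fun c => !(PySem.Chars.isspace c) && !(c == ','))).map PySem.Chars.upperChar with htdef
  have hinv : t.filter (fun a => !(aaAlphabet.contains a)) = [] := by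
    apply List.filter_eq_nil_iff.mpr
    intro a ha
    simp [ht a ha]
  have hbad : PySem.Set.diff (PySem.Set.ofList t) aaAlphabet = [] := by
    unfold PySem.Set.diff
    apply List.filter_eq_nil_iff.mpr
    intro a ha
    simp [ht a ((PySem.Set.mem_ofList t a).mp ha)]
  have hu : (raw_value.toList.filter (fun c => !(PySem.Chars.isspace c) && !(c == ','))).map
      PySem.Chars.upperChar = t := by
    rw [hs_eq]
  have hBval : parse_restricted_aas_alt raw_value = String.mk (PySem.List.dedup t) := by
    unfold parse_restricted_aas_alt
    simp only
    rw [hu, hbad, pvSorted_eq_dedup t ht]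
    rw [if_neg (show ¬((PySem.List.sorted ([] : List Char) (fun x => x) false) ≠ []) by decide)]
  have hAval : parse_restricted_aas raw_value = String.mk (PySem.List.dedup t) := by
    unfold parse_restricted_aas
    simp only
    rw [← htdef, hinv]
    rw [if_neg (show ¬((PySem.List.sorted (PySem.Set.ofList ([] : List Char)) (fun x => x) false)
      ≠ []) by decide)]
    by_cases hemp : PySem.Str.strip raw_value = ""
    · have hnil : (PySem.Str.strip raw_value).toList = [] := by rw [hemp]; rfl
      have htnil : t = [] := by rw [htdef, hnil]; rfl
      rw [if_pos hemp, htnil]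
      rfl
    · rw [if_neg hemp]
  rw [hAval, hBval]
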